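-- pv_equiv track=rewrite | github.com/upadhyan/ticl-main | RADDT-main/distributedMultiGPUVersion/src/warmStart.py | getNodesId2
-- ===== SOURCE A (Python) =====
-- def getNodesId2(ind, Hind):
--     ind -= 1                  # index starts from 0
--     branchNodes = [ind]
--     currentNodes = [ind]
--     for _ in range(Hind-1):
--         nextNodes = [2*node + j for node in currentNodes for j in [1, 2]]
--         branchNodes.extend(nextNodes)
--         currentNodes = nextNodes
--     leftLeaf = 2*(ind+1) if Hind == 1 else 2*(nextNodes[0]+1)
--     leafNodes = [2 * (ind+1) + i  for i in [0, 1]] if Hind ==1 else [2 * (leafNodeParent+1) + i for leafNodeParent in nextNodes for i in [0, 1]]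
--     return branchNodes, leftLeaf, leafNodes
-- ===== SOURCE B (Python) =====
-- def getNodesId2(ind, Hind):
--     branchNodes = []
--     for k in range(Hind):
--         width = 2 ** k
--         start = width * ind
--         level = [start + j for j in range(width)]
--         branchNodes.extend(p - 1 for p in level)
--     leafNodes = [2 * p + i for p in level for i in (0, 1)]
--     return branchNodes, leafNodes[0], leafNodes
-- ===== Notes on version B (the rewrite author's own statement) =====
-- stated objective: alternative
-- what changed: B computes each tree level directly as a closed-form contiguous range (start=(2**k)*ind in p-space) with no dependency on the previous level, instead of A's child-expansion of the previous level, and derives leftLeaf as leafNodes[0] instead of A's special-cased formulas; Pre_ excludes Hind <= 0, where both raise NameError.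
import Mathlib
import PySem

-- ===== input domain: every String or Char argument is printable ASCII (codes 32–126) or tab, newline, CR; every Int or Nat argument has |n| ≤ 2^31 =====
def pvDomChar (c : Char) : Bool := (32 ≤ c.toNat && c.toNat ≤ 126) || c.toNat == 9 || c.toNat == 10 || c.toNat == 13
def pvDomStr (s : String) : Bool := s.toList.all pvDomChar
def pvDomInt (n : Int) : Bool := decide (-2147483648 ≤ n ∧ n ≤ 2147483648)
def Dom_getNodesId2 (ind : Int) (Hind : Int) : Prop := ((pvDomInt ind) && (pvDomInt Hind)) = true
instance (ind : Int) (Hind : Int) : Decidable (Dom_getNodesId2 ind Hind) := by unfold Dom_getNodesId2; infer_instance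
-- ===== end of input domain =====

-- B builds each level of the subtree directly by a closed-form contiguous range per level
-- (no child-of-previous-level expansion); objective: simpler/alternative, same asymptotic cost.

-- ===== PORT A =====
-- loop body of A: nextNodes = [2*node + j for node in currentNodes for j in [1, 2]]
def pvAStep (st : List Int × List Int) (_ : Int) : List Int × List Int :=
  let nextNodes := st.2.flatMap (fun node => ([1, 2] : List Int).map (fun j => 2 * node + j))
  (st.1 ++ nextNodes, nextNodes)

def getNodesId2 (ind : Int) (Hind : Int) : List Int × Int × List Int :=
  let ind0 := ind - 1                       -- ind -= 1
  let st := (PySem.List.pyRange 0 (Hind - 1) 1).foldl pvAStep ([ind0], [ind0])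
  -- after the loop, Python's `nextNodes` (for Hind ≠ 1) is the final `currentNodes`
  let nextNodes := st.2
  let leftLeaf :=
    if Hind = 1 then 2 * (ind0 + 1)
    else match PySem.List.pyGet? nextNodes 0 with
      | some x => 2 * (x + 1)
      | none => 0                           -- unreachable under Pre_ (nextNodes nonempty)
  let leafNodes :=
    if Hind = 1 then ([0, 1] : List Int).map (fun i => 2 * (ind0 + 1) + i)
    else nextNodes.flatMap (fun p => ([0, 1] : List Int).map (fun i => 2 * (p + 1) + i))
  (st.1, leftLeaf, leafNodes)

-- ===== PORT B =====
-- loop body of B: level k is the contiguous range [2^k*ind .. 2^k*ind + 2^k - 1] in p-space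
def pvBStep (ind : Int) (st : List Int × List Int) (k : Int) : List Int × List Int :=
  let width : Int := 2 ^ k.toNat
  let start := width * ind
  let level := (PySem.List.pyRange 0 width 1).map (fun j => start + j)
  (st.1 ++ level.map (fun p => p - 1), level)

def getNodesId2_alt (ind : Int) (Hind : Int) : List Int × Int × List Int :=
  let st := (PySem.List.pyRange 0 Hind 1).foldl (pvBStep ind) ([], [])
  let level := st.2
  let leafNodes := level.flatMap (fun p => [2 * p, 2 * p + 1])
  let leftLeaf :=
    match PySem.List.pyGet? leafNodes 0 with
      | some x => x
      | none => 0                           -- unreachable under Pre_ (leafNodes nonempty)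
  (st.1, leftLeaf, leafNodes)

-- ===== PRECONDITION & SPEC =====
-- Pre_ excludes Hind ≤ 0, where Python A raises NameError (`nextNodes` is never bound);
-- B raises the same NameError there (`level` unbound).
def Pre_getNodesId2 (ind : Int) (Hind : Int) : Prop := 1 ≤ Hind
instance (ind : Int) (Hind : Int) : Decidable (Pre_getNodesId2 ind Hind) := by unfold Pre_getNodesId2; infer_instance
def pvWitness_getNodesId2 : Int × Int := (3, 3)

def Spec_getNodesId2 (ind : Int) (Hind : Int) (out : List Int × Int × List Int) : Prop := out = getNodesId2_alt ind Hind
instance (ind : Int) (Hind : Int) (out : List Int × Int × List Int) : Decidable (Spec_getNodesId2 ind Hind out) := by unfold Spec_getNodesId2; infer_instance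

-- ===== CLAIM (what is proved, stated in full; the proofs are below) =====
def Claim_equal_getNodesId2 : Prop := ∀ (ind : Int) (Hind : Int), Dom_getNodesId2 ind Hind → Pre_getNodesId2 ind Hind → Spec_getNodesId2 ind Hind (getNodesId2 ind Hind)

-- ===== LEMMAS AND PROOFS =====

-- p-space node ids of level n of the subtree rooted at p = ind
def pvL (ind : Int) (n : Nat) : List Int :=
  (List.range (2 ^ n)).map (fun j : Nat => (2 ^ n : Int) * ind + (j : Int))

-- range doubling: mapping over range (2*m) = flatMap of pairs over range m
theorem pv_range_double {α : Type} (f : Nat → α) (m : Nat) :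
    (List.range (2 * m)).map f = (List.range m).flatMap (fun j => [f (2 * j), f (2 * j + 1)]) := by
  induction m with
  | zero => simp
  | succ m ih =>
    have h2 : 2 * (m + 1) = (2 * m + 1) + 1 := by omega
    rw [h2, List.range_succ, List.range_succ, List.range_succ]
    simp [ih]

-- children of level n (0-based) are level n+1 (0-based)
theorem pv_level_step (ind : Int) (n : Nat) :
    ((pvL ind n).map (fun p => p - 1)).flatMap
      (fun node => ([1, 2] : List Int).map (fun j => 2 * node + j))
      = (pvL ind (n + 1)).map (fun p => p - 1) := by
  have h2 : 2 ^ (n + 1) = 2 * 2 ^ n := by rw [pow_succ]; ring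
  unfold pvL
  rw [List.map_map, List.map_map, List.flatMap_map, h2,
    pv_range_double ((fun p => p - 1) ∘ fun j : Nat => ((2 : Int) ^ (n + 1)) * ind + (j : Int)) (2 ^ n)]
  apply List.flatMap_congr
  intro j _
  simp only [Function.comp_apply, List.map_cons, List.map_nil, List.cons.injEq, and_true]
  exact ⟨by push_cast; ring, by push_cast; ring⟩

theorem pv_pyRange_pow (w : Nat) :
    PySem.List.pyRange 0 ((2 : Int) ^ w) 1 = (List.range (2 ^ w)).map (fun k : Nat => (k : Int)) := by
  rw [PySem.List.pyRange_one]
  have h : ((2 : Int) ^ w - 0).toNat = 2 ^ w := by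
    rw [sub_zero, show ((2 : Int) ^ w) = ((2 ^ w : Nat) : Int) by push_cast; ring]
    exact Int.toNat_natCast _
  rw [h]
  simp

-- the fold invariant tying A's state after n steps to B's state after n+1 steps
theorem pv_inv (ind : Int) (n : Nat) :
    ((PySem.List.pyRange 0 (n : Int) 1).foldl pvAStep ([ind - 1], [ind - 1])).1
      = ((PySem.List.pyRange 0 ((n : Int) + 1) 1).foldl (pvBStep ind) ([], [])).1
    ∧ ((PySem.List.pyRange 0 (n : Int) 1).foldl pvAStep ([ind - 1], [ind - 1])).2
      = (pvL ind n).map (fun p => p - 1)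
    ∧ ((PySem.List.pyRange 0 ((n : Int) + 1) 1).foldl (pvBStep ind) ([], [])).2
      = pvL ind n := by
  induction n with
  | zero =>
    refine ⟨?_, ?_, ?_⟩ <;>
      simp [PySem.List.pyRange_zero, pvBStep, pvL, List.range_succ]
  | succ n ih =>
    obtain ⟨ih1, ih2, ih3⟩ := ih
    have hA : PySem.List.pyRange 0 ((n : Int) + 1) 1
        = PySem.List.pyRange 0 (n : Int) 1 ++ [(n : Int)] :=
      PySem.List.pyRange_one_succ_right (by positivity)
    have hB : PySem.List.pyRange 0 (((n : Int) + 1) + 1) 1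
        = PySem.List.pyRange 0 ((n : Int) + 1) 1 ++ [(n : Int) + 1] :=
      PySem.List.pyRange_one_succ_right (by positivity)
    have hcast : (((n : Nat) + 1 : Nat) : Int) = (n : Int) + 1 := by push_cast; ring
    have hfoldA : (PySem.List.pyRange 0 ((n : Int) + 1) 1).foldl pvAStep ([ind - 1], [ind - 1])
        = pvAStep ((PySem.List.pyRange 0 (n : Int) 1).foldl pvAStep ([ind - 1], [ind - 1])) (n : Int) := by
      rw [hA, List.foldl_append]; rfl
    have hfoldB2 : (PySem.List.pyRange 0 (((n : Int) + 1) + 1) 1).foldl (pvBStep ind) ([], [])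
        = pvBStep ind ((PySem.List.pyRange 0 ((n : Int) + 1) 1).foldl (pvBStep ind) ([], [])) ((n : Int) + 1) := by
      rw [hB, List.foldl_append]; rfl
    rw [hcast, hfoldA, hfoldB2]
    have hlev : (pvBStep ind ((PySem.List.pyRange 0 ((n : Int) + 1) 1).foldl (pvBStep ind) ([], [])) ((n : Int) + 1)).2 = pvL ind (n + 1) := by
      show ((PySem.List.pyRange 0 ((2:Int) ^ ((n : Int) + 1).toNat) 1).map
        (fun j => (2:Int) ^ ((n : Int) + 1).toNat * ind + j)) = pvL ind (n + 1)
      have ht : ((n : Int) + 1).toNat = n + 1 := by omega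
      rw [ht, pv_pyRange_pow, List.map_map]
      unfold pvL
      rfl
    refine ⟨?_, ?_, hlev⟩
    · show ((PySem.List.pyRange 0 (n : Int) 1).foldl pvAStep ([ind - 1], [ind - 1])).1
          ++ ((PySem.List.pyRange 0 (n : Int) 1).foldl pvAStep ([ind - 1], [ind - 1])).2.flatMap
              (fun node => ([1, 2] : List Int).map (fun j => 2 * node + j))
          = ((PySem.List.pyRange 0 ((n : Int) + 1) 1).foldl (pvBStep ind) ([], [])).1
          ++ (pvBStep ind ((PySem.List.pyRange 0 ((n : Int) + 1) 1).foldl (pvBStep ind) ([], [])) ((n : Int) + 1)).2.map (fun p => p - 1)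
      rw [ih1, ih2, pv_level_step, hlev]
    · show ((PySem.List.pyRange 0 (n : Int) 1).foldl pvAStep ([ind - 1], [ind - 1])).2.flatMap
          (fun node => ([1, 2] : List Int).map (fun j => 2 * node + j))
          = (pvL ind (n + 1)).map (fun p => p - 1)
      rw [ih2, pv_level_step]

theorem pv_head_L (ind : Int) (n : Nat) (f : Int → Int) :
    PySem.List.pyGet? ((pvL ind n).map f) 0 = some (f ((2 ^ n : Int) * ind)) := by
  obtain ⟨m, hm⟩ : ∃ m, 2 ^ n = m + 1 := ⟨2 ^ n - 1, by have := Nat.one_le_two_pow (n := n); omega⟩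
  unfold pvL
  rw [hm, List.range_succ_eq_map]
  simp

-- ===== VERDICT (by name: the statement is the Claim_ definition above) =====
theorem getNodesId2_spec : Claim_equal_getNodesId2 := by
  intro ind Hind _ hpre
  have hpre' : (1 : Int) ≤ Hind := hpre
  obtain ⟨n, hn⟩ : ∃ n : Nat, Hind = (n : Int) + 1 := ⟨(Hind - 1).toNat, by omega⟩
  subst hn
  unfold Spec_getNodesId2
  simp only [getNodesId2, getNodesId2_alt]
  have hm1 : (n : Int) + 1 - 1 = (n : Int) := by ring
  rw [hm1]
  obtain ⟨h1, h2, h3⟩ := pv_inv ind n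
  rw [h1, h2, h3]
  have hleaf : ((pvL ind n).map (fun p => p - 1)).flatMap
          (fun p => ([0, 1] : List Int).map (fun i => 2 * (p + 1) + i))
      = (pvL ind n).flatMap (fun p => [2 * p, 2 * p + 1]) := by
    rw [List.flatMap_map]
    apply List.flatMap_congr
    intro p _
    simp
  have hhead : PySem.List.pyGet? ((pvL ind n).flatMap (fun p => [2 * p, 2 * p + 1])) 0
      = some ((2 ^ (n + 1) : Int) * ind) := by
    obtain ⟨m, hm⟩ : ∃ m, 2 ^ n = m + 1 := ⟨2 ^ n - 1, by have := Nat.one_le_two_pow (n := n); omega⟩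
    unfold pvL
    rw [hm, List.range_succ_eq_map]
    simp [PySem.List.pyGet?_zero]
    push_cast [pow_succ]
    ring
  rw [hhead]
  rcases Nat.eq_zero_or_pos n with hn0 | hnpos
  · subst hn0
    simp only [Nat.cast_zero, zero_add]
    refine Prod.ext rfl (Prod.ext ?_ ?_)
    · show 2 * (ind - 1 + 1) = (2 ^ (0 + 1) : Int) * ind
      ring
    · show ([0, 1] : List Int).map (fun i => 2 * (ind - 1 + 1) + i)
          = (pvL ind 0).flatMap (fun p => [2 * p, 2 * p + 1])
      unfold pvL
      simp
  · have hne : ¬ ((n : Int) + 1 = 1) := by omega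
    rw [if_neg hne, if_neg hne, pv_head_L]
    refine Prod.ext rfl (Prod.ext ?_ ?_)
    · show 2 * ((2 ^ n : Int) * ind - 1 + 1) = (2 ^ (n + 1) : Int) * ind
      push_cast [pow_succ]
      ring
    · exact hleaf
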